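-- pv_equiv track=rewrite | github.com/drberg1000/Codility | Mayo SE Practice Tests/SSE/TryA-2-UniqueStringSplits.py | solution
-- ===== SOURCE A (Python) =====
-- def solution(s):
--     this_substring = set()
--     substring_count = 1
--
--     for char in s:
--         if char in this_substring:
--             this_substring.clear()
--             substring_count += 1
--         this_substring.add(char)
--
--     return substring_count
-- ===== SOURCE B (Python) =====
-- def solution(s):
--     # Two staged passes: first compute each position's next-occurrence index,
--     # then count segments by scanning with a running minimum of those indices:
--     # the current segment ends exactly at the minimum next-occurrence index
--     # recorded inside it.
--     n = len(s)
--     nxt = []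
--     first = {}
--     for i in range(n - 1, -1, -1):
--         nxt.append(first.get(s[i], n))
--         first[s[i]] = i
--     nxt.reverse()
--     count = 1
--     m = n
--     for i, x in enumerate(nxt):
--         if i == m:
--             count += 1
--             m = n
--         if x < m:
--             m = x
--     return count
-- ===== Notes on version B (the rewrite author's own statement) =====
-- stated objective: alternative
-- what changed: Replaces A's single pass with a clear-on-repeat set of current-segment characters by two staged passes: a backward pass that precomputes for every position the index of the next occurrence of its character, then a forward pass that keeps only a running minimum of those indices and starts a new segment exactly when the scan index reaches that minimum - no membership test or set/segment state in the counting pass.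
import Mathlib
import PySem

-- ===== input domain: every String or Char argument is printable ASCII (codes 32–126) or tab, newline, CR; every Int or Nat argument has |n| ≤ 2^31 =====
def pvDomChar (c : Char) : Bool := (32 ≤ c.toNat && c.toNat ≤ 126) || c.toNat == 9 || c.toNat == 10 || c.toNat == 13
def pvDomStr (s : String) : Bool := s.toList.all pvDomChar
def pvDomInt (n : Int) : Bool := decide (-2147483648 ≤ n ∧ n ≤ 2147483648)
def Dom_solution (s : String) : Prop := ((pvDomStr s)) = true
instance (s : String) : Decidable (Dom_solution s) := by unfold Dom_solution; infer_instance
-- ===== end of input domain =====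

-- B replaces A's clear-on-repeat set with two staged passes: a backward next-occurrence
-- pass and a forward running-minimum scan (alternative algorithm, same O(n) cost).

-- ===== PORT A =====
-- A: scan chars keeping the current segment's character set; on a repeat, clear it and bump the count, then add the char.
def solution (s : String) : Int :=
  (s.toList.foldl
    (fun (st : PySem.Set Char × Int) char =>
      if PySem.Set.contains st.1 char then
        (PySem.Set.add PySem.Set.empty char, st.2 + 1)
      else
        (PySem.Set.add st.1 char, st.2))
    (PySem.Set.empty, 1)).2

-- ===== PORT B =====
-- B: backward pass builds nxt (next-occurrence index of each position's char, n if none)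
-- via append+reverse; forward pass over enumerate(nxt) keeps a running minimum m and
-- bumps the count when the index reaches m.
-- s[i] in the backward pass is ported as pyGetD with a dummy default: every i drawn from
-- range(n-1,-1,-1) is in range, so this is exact.
def solution_alt (s : String) : Int :=
  let l := s.toList
  let n : Int := PySem.List.len l
  let p1 := (PySem.List.pyRange (n - 1) (-1) (-1)).foldl
    (fun (st : List Int × PySem.Dict Char Int) j =>
      (st.1 ++ [PySem.Dict.getD st.2 (PySem.List.pyGetD l j ' ') n],
       PySem.Dict.insert st.2 (PySem.List.pyGetD l j ' ') j))
    ([], PySem.Dict.empty)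
  let nxt := p1.1.reverse
  ((PySem.List.enumerate nxt).foldl
    (fun (st : Int × Int) (ix : Int × Int) =>
      let st1 := if ix.1 == st.1 then (n, st.2 + 1) else st
      (if ix.2 < st1.1 then ix.2 else st1.1, st1.2))
    (n, 1)).2

-- ===== PRECONDITION & SPEC =====
def Spec_solution (s : String) (out : Int) : Prop := out = solution_alt s
instance (s : String) (out : Int) : Decidable (Spec_solution s out) := by unfold Spec_solution; infer_instance

-- ===== CLAIM (what is proved, stated in full; the proofs are below) =====
def Claim_equal_solution : Prop := ∀ (s : String), Dom_solution s → Spec_solution s (solution s)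

-- ===== LEMMAS AND PROOFS =====

-- first index ≥ i at which c occurs in L, as Int; L.length if none
def firstFrom (L : List Char) (i : Nat) (c : Char) : Int :=
  if h : i < L.length then
    if L.getD i ' ' = c then (i : Int) else firstFrom L (i + 1) c
  else (L.length : Int)
termination_by L.length - i

-- next occurrence of position k's character, the value pass 1 stores at k
def nxtSpec (L : List Char) (k : Nat) : Int := firstFrom L (k + 1) (L.getD k ' ')

theorem firstFrom_of_ge (L : List Char) (i : Nat) (c : Char) (h : L.length ≤ i) :
    firstFrom L i c = (L.length : Int) := by
  rw [firstFrom]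
  simp [Nat.not_lt.mpr h]

theorem firstFrom_cons (L : List Char) (i : Nat) (c : Char) (h : i < L.length) :
    firstFrom L i c = if L.getD i ' ' = c then (i : Int) else firstFrom L (i + 1) c := by
  rw [firstFrom]
  simp [h]

-- full characterisation of firstFrom
theorem firstFrom_spec (L : List Char) (c : Char) (i : Nat) (hi : i ≤ L.length) :
    ∃ j : Nat, firstFrom L i c = (j : Int) ∧ i ≤ j ∧ j ≤ L.length ∧
      (j < L.length → L.getD j ' ' = c) ∧
      (∀ t, i ≤ t → t < j → L.getD t ' ' ≠ c) := by
  induction hn : L.length - i generalizing i with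
  | zero =>
    have : i = L.length := by omega
    subst this
    exact ⟨L.length, firstFrom_of_ge L L.length c le_rfl, le_rfl, le_rfl,
      by omega, by omega⟩
  | succ n ih =>
    have hlt : i < L.length := by omega
    rw [firstFrom_cons L i c hlt]
    by_cases hc : L.getD i ' ' = c
    · exact ⟨i, by rw [if_pos hc], le_rfl, le_of_lt hlt, fun _ => hc, by omega⟩
    · obtain ⟨j, h1, h2, h3, h4, h5⟩ := ih (i + 1) (by omega) (by omega)
      refine ⟨j, by rw [if_neg hc]; exact h1, by omega, h3, h4, ?_⟩
      intro t ht1 ht2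
      rcases Nat.eq_or_lt_of_le ht1 with h | h
      · subst h; exact hc
      · exact h5 t h ht2

-- ===== pass 1: the fold over range(n-1,-1,-1) builds exactly [nxtSpec 0, …, nxtSpec (i-1)] reversed =====
theorem pass1 (L : List Char) (i : Nat) :
    ∀ (acc : List Int) (d : PySem.Dict Char Int), i ≤ L.length →
    (∀ c, PySem.Dict.getD d c (L.length : Int) = firstFrom L i c) →
    ((PySem.List.pyRange ((i : Int) - 1) (-1) (-1)).foldl
      (fun (st : List Int × PySem.Dict Char Int) j =>
        (st.1 ++ [PySem.Dict.getD st.2 (PySem.List.pyGetD L j ' ') (L.length : Int)],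
         PySem.Dict.insert st.2 (PySem.List.pyGetD L j ' ') j))
      (acc, d)).1
    = acc ++ ((List.range i).map (fun k => nxtSpec L k)).reverse := by
  induction i with
  | zero =>
    intro acc d _ _
    rw [PySem.List.pyRange_neg_one_eq_nil (by norm_num)]
    simp
  | succ i ih =>
    intro acc d hi hd
    have hcast : ((i + 1 : Nat) : Int) - 1 = ((i : Nat) : Int) := by push_cast; ring
    rw [hcast, PySem.List.pyRange_neg_one_cons (by omega)]
    simp only [List.foldl_cons, PySem.List.pyGetD_natCast]
    rw [ih _ _ (by omega) ?hd]
    case hd =>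
      intro c
      rw [PySem.Dict.getD_insert]
      by_cases hc : c = L.getD i ' '
      · rw [if_pos hc, firstFrom_cons L i c (by omega), if_pos hc.symm]
      · rw [if_neg hc, hd c, firstFrom_cons L i c (by omega),
          if_neg (fun h => hc h.symm)]
    rw [hd (L.getD i ' '), List.range_succ]
    simp [nxtSpec]

-- ===== pass 2 coupled with A's fold =====
theorem agree (L : List Char) (N : Nat) :
    ∀ (i p : Nat) (seen : PySem.Set Char) (m cnt : Int),
    L.length - i = N → p ≤ i → i ≤ L.length →
    (∀ c, c ∈ seen ↔ ∃ k, p ≤ k ∧ k < i ∧ L.getD k ' ' = c) →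
    (∀ k, p ≤ k → k < i → m ≤ nxtSpec L k) →
    (m = (L.length : Int) ∨ ∃ k, p ≤ k ∧ k < i ∧ nxtSpec L k = m) →
    (i : Int) ≤ m →
    ((L.drop i).foldl
      (fun (st : PySem.Set Char × Int) char =>
        if PySem.Set.contains st.1 char then
          (PySem.Set.add PySem.Set.empty char, st.2 + 1)
        else
          (PySem.Set.add st.1 char, st.2)) (seen, cnt)).2
    =
    ((PySem.List.enumerate ((List.range' i (L.length - i)).map (fun k => nxtSpec L k)) (i : Int)).foldl
      (fun (st : Int × Int) (ix : Int × Int) =>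
        let st1 := if ix.1 == st.1 then ((L.length : Int), st.2 + 1) else st
        (if ix.2 < st1.1 then ix.2 else st1.1, st1.2)) (m, cnt)).2 := by
  induction N with
  | zero =>
    intro i p seen m cnt hN hp hin hseen hlb hatt hge
    have : i = L.length := by omega
    subst this
    rw [List.drop_eq_nil_of_le le_rfl, hN]
    simp [PySem.List.enumerate_nil]
  | succ N ih =>
    intro i p seen m cnt hN hp hin hseen hlb hatt hge
    have hiL : i < L.length := by omega
    -- bounds on nxtSpec L i
    obtain ⟨j', hj'1, hj'2, hj'3, _, _⟩ := firstFrom_spec L (L.getD i ' ') (i + 1) (by omega)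
    have hnx1 : nxtSpec L i = (j' : Int) := by simp only [nxtSpec]; exact hj'1
    have hnx_ge : (i : Int) + 1 ≤ nxtSpec L i := by rw [hnx1]; exact_mod_cast hj'2
    have hnx_le : nxtSpec L i ≤ (L.length : Int) := by rw [hnx1]; exact_mod_cast hj'3
    rw [List.drop_eq_getElem_cons hiL]
    have hsplit : L.length - i = (L.length - (i + 1)) + 1 := by
      rw [← Nat.sub_sub, Nat.sub_add_cancel (by omega)]
    rw [hsplit, List.range'_succ]
    simp only [List.map_cons, PySem.List.enumerate_cons, List.foldl_cons]
    have hgetE : L[i] = L.getD i ' ' := (List.getD_eq_getElem L ' ' hiL).symm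
    have hcast1 : (i : Int) + 1 = ((i + 1 : Nat) : Int) := by push_cast; ring
    by_cases hc : ∃ k, p ≤ k ∧ k < i ∧ L.getD k ' ' = L.getD i ' '
    · -- repeated character: A clears and bumps; B's scan index has reached m
      have hmem : PySem.Set.contains seen L[i] = true := by
        rw [hgetE]; exact (PySem.Set.contains_iff seen _).mpr ((hseen _).mpr hc)
      -- the greatest prior occurrence has next-occurrence exactly i, so m = i
      have hm : m = (i : Int) := by
        obtain ⟨k0, hk01, hk02, hk03⟩ := hc
        set P : Nat → Prop := fun k => p ≤ k ∧ L.getD k ' ' = L.getD i ' ' with hP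
        have hk0b : k0 ≤ i - 1 := by omega
        have hPg : P (Nat.findGreatest P (i - 1)) :=
          Nat.findGreatest_spec hk0b ⟨hk01, hk03⟩
        set g := Nat.findGreatest P (i - 1) with hg
        have hgle : g ≤ i - 1 := Nat.findGreatest_le (i - 1)
        have hgi : g < i := by omega
        obtain ⟨j, hj1, hj2, hj3, hj4, hj5⟩ :=
          firstFrom_spec L (L.getD i ' ') (g + 1) (by omega)
        have hnxg : nxtSpec L g = firstFrom L (g + 1) (L.getD i ' ') := by
          simp only [nxtSpec, hPg.2]
        have hji : j = i := by
          rcases lt_trichotomy j i with h | h | h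
          · exfalso
            have hjP : P j := ⟨by omega, hj4 (by omega)⟩
            exact absurd hjP (Nat.findGreatest_is_greatest (n := i - 1) (k := j) (by omega) (by omega))
          · exact h
          · exfalso; exact hj5 i (by omega) h rfl
        have : m ≤ (i : Int) := by
          have := hlb g hPg.1 hgi
          rw [hnxg, hj1, hji] at this
          exact this
        omega
      rw [if_pos hmem, hm]
      simp only [beq_self_eq_true, if_true]
      have hmin : (if nxtSpec L i < (L.length : Int) then nxtSpec L i
          else (L.length : Int)) = nxtSpec L i := by
        split_ifs with h
        · rfl
        · omega
      simp only [hmin, hcast1]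
      refine ih (i + 1) i _ _ _ (by omega) (by omega) (by omega) ?_ ?_ ?_ ?_
      · intro c
        rw [PySem.Set.mem_add]
        constructor
        · rintro (h | h)
          · simp [PySem.Set.empty] at h
          · exact ⟨i, le_rfl, by omega, by rw [← hgetE]; exact h.symm⟩
        · rintro ⟨k, hk1, hk2, hk3⟩
          have : k = i := by omega
          subst this
          exact Or.inr (by rw [hgetE]; exact hk3.symm)
      · intro k hk1 hk2
        have : k = i := by omega
        subst this; exact le_rfl
      · exact Or.inr ⟨i, le_rfl, by omega, rfl⟩
      · push_cast; omega
    · -- fresh character: A adds to the set; B's index has not reached m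
      have hmem : ¬ PySem.Set.contains seen L[i] = true := by
        rw [hgetE]
        intro h
        exact hc ((hseen _).mp ((PySem.Set.contains_iff seen _).mp h))
      have hmne : (i : Int) ≠ m := by
        intro h
        rcases hatt with h' | ⟨k, hk1, hk2, hk3⟩
        · omega
        · obtain ⟨j, hj1, hj2, hj3, hj4, hj5⟩ :=
            firstFrom_spec L (L.getD k ' ') (k + 1) (by omega)
          have : nxtSpec L k = (j : Int) := by simp only [nxtSpec]; exact hj1
          rw [this, ← h] at hk3
          have hji : j = i := by exact_mod_cast hk3
          subst hji
          exact hc ⟨k, hk1, hk2, (hj4 hiL).symm⟩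
      have hbeq : ((i : Int) == m) = false := beq_eq_false_iff_ne.mpr hmne
      rw [if_neg hmem]
      simp only [hbeq, Bool.false_eq_true, if_false, hcast1]
      refine ih (i + 1) p _ _ _ (by omega) (by omega) (by omega) ?_ ?_ ?_ ?_
      · intro c
        rw [PySem.Set.mem_add]
        constructor
        · rintro (h | h)
          · obtain ⟨k, hk1, hk2, hk3⟩ := (hseen c).mp h
            exact ⟨k, hk1, by omega, hk3⟩
          · exact ⟨i, by omega, by omega, by rw [← hgetE]; exact h.symm⟩
        · rintro ⟨k, hk1, hk2, hk3⟩
          by_cases hki : k = i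
          · subst hki
            exact Or.inr (by rw [hgetE]; exact hk3.symm)
          · exact Or.inl ((hseen c).mpr ⟨k, hk1, by omega, hk3⟩)
      · intro k hk1 hk2
        by_cases hki : k = i
        · subst hki
          split_ifs <;> omega
        · have := hlb k hk1 (by omega)
          split_ifs <;> omega
      · split_ifs with h
        · exact Or.inr ⟨i, by omega, by omega, rfl⟩
        · rcases hatt with h' | ⟨k, hk1, hk2, hk3⟩
          · exact Or.inl h'
          · exact Or.inr ⟨k, hk1, by omega, hk3⟩
      · split_ifs with h <;> push_cast <;> omega

-- ===== VERDICT (by name: the statement is the Claim_ definition above) =====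
theorem solution_spec : Claim_equal_solution := by
  intro s _
  unfold Spec_solution solution solution_alt
  simp only [PySem.List.len_eq]
  rw [pass1 s.toList s.toList.length [] PySem.Dict.empty le_rfl
    (fun c => by rw [PySem.Dict.getD_empty, firstFrom_of_ge s.toList s.toList.length c le_rfl])]
  simp only [List.nil_append, List.reverse_reverse]
  have key := agree s.toList s.toList.length 0 0 PySem.Set.empty (s.toList.length : Int) 1
    (by omega) le_rfl (by omega)
    (by intro c; simp [PySem.Set.empty])
    (by omega) (Or.inl rfl) (by omega)
  simp only [List.drop_zero, Nat.sub_zero, Nat.cast_zero, ← List.range_eq_range'] at key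
  exact key
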